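-- pv_equiv track=rewrite | github.com/DrBobFailla/GitRepositories | Modules/directoryComparisonUtilities.py | pathByFileRoot
-- ===== SOURCE A (Python) =====
-- def pathByFileRoot(filenamelist):
--     """
--     Inputs a list of {file roots, paths} (the file root for file.txt and file.csv is file.
--     Outputs a dictionary of file roots with a count of the directories where each file root is found)
--     """
--     filenamedict = dict()
--     for i in sorted(filenamelist):
--         if i[0] in filenamedict:
--             filenamedict[i[0]].append(i[1])
--         else:
--             filenamedict[i[0]] = [i[1]]
--     return filenamedict
-- ===== SOURCE B (Python) =====
-- def pathByFileRoot(filenamelist):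
--     """
--     Same result as A: sort once, then sweep the sorted list run by run
--     (equal roots are adjacent after sorting), so no per-item dict
--     membership test is needed; each root is assigned exactly once.
--     """
--     s = sorted(filenamelist)
--     result = {}
--     i, n = 0, len(s)
--     while i < n:
--         root = s[i][0]
--         j = i + 1
--         while j < n and s[j][0] == root:
--             j += 1
--         result[root] = [p for _, p in s[i:j]]
--         i = j
--     return result
-- ===== Notes on version B (the rewrite author's own statement) =====
-- stated objective: alternative
-- what changed: Instead of maintaining a dict with a membership test per element, B sorts once and sweeps the sorted list run by run (equal roots are adjacent), slicing out each run and assigning every key exactly once.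
import Mathlib
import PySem

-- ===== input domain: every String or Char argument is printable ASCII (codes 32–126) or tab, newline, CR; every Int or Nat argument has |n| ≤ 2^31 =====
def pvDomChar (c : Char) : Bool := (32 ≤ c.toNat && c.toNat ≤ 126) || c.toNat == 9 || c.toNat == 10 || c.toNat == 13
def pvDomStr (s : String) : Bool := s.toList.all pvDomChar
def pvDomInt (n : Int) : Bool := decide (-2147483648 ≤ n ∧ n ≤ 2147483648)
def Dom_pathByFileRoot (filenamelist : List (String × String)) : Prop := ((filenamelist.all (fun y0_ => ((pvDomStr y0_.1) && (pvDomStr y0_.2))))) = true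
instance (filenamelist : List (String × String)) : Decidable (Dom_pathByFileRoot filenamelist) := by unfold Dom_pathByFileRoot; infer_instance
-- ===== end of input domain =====

-- B replaces A's per-element dict membership test by a single run-by-run sweep of the
-- sorted list (equal roots are adjacent after sorting); return value only, no mutation.

-- ===== PORT A =====
-- A: for i in sorted(filenamelist): if i[0] in d: d[i[0]].append(i[1]) else: d[i[0]] = [i[1]]
def pathByFileRoot (filenamelist : List (String × String)) : List (String × List String) :=
  ((PySem.List.sorted2 filenamelist Prod.fst Prod.snd false).foldl
    (fun d i =>
      if d.contains i.1 then d.modify i.1 [] (fun v => v ++ [i.2])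
      else d.insert i.1 [i.2])
    (PySem.Dict.empty : PySem.Dict String (List String))).items

-- ===== PORT B =====
-- B's outer while loop: one recursive call per run of equal roots; the inner scan
-- j..(run end) and the slice s[i:j] are takeWhile, the advance i = j is dropWhile.
-- B's dict receives each key exactly once (fresh keys append), so it IS this run list.
def pvRuns : List (String × String) → List (String × List String)
  | [] => []
  | (k, v) :: rest =>
      (k, v :: (rest.takeWhile (fun p => p.1 == k)).map Prod.snd)
        :: pvRuns (rest.dropWhile (fun p => p.1 == k))
termination_by l => l.length
decreasing_by
  simpa using Nat.lt_succ_of_le (List.dropWhile_sublist _ (l := rest)).length_le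

def pathByFileRoot_alt (filenamelist : List (String × String)) : List (String × List String) :=
  pvRuns (PySem.List.sorted2 filenamelist Prod.fst Prod.snd false)

-- ===== PRECONDITION & SPEC =====
def Spec_pathByFileRoot (filenamelist : List (String × String)) (out : List (String × List String)) : Prop := out = pathByFileRoot_alt filenamelist
instance (filenamelist : List (String × String)) (out : List (String × List String)) : Decidable (Spec_pathByFileRoot filenamelist out) := by unfold Spec_pathByFileRoot; infer_instance

-- ===== CLAIM (what is proved, stated in full; the proofs are below) =====
def Claim_equal_pathByFileRoot : Prop := ∀ (filenamelist : List (String × String)), Dom_pathByFileRoot filenamelist → Spec_pathByFileRoot filenamelist (pathByFileRoot filenamelist)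

-- ===== LEMMAS AND PROOFS =====

-- insertBy with any comparator compatible with the key order preserves key-sortedness
theorem pvInsertBy_pairwise (before : (String × String) → (String × String) → Bool)
    (h1 : ∀ a b, before a b = true → a.1 ≤ b.1)
    (h2 : ∀ a b, before a b = false → b.1 ≤ a.1)
    (x : String × String) (ys : List (String × String))
    (hys : ys.Pairwise (fun a b => a.1 ≤ b.1)) :
    (PySem.List.insertBy before x ys).Pairwise (fun a b => a.1 ≤ b.1) := by
  induction ys with
  | nil => simp [PySem.List.insertBy]
  | cons y t ih =>
    rw [List.pairwise_cons] at hys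
    obtain ⟨hy, ht⟩ := hys
    by_cases hb : before x y = true
    · simp only [PySem.List.insertBy, hb, if_true]
      refine List.Pairwise.cons ?_ (List.Pairwise.cons hy ht)
      intro z hz
      rcases List.mem_cons.mp hz with rfl | hz
      · exact h1 _ _ hb
      · exact le_trans (h1 _ _ hb) (hy z hz)
    · have hb' : before x y = false := by
        cases h : before x y
        · rfl
        · exact absurd h hb
      simp only [PySem.List.insertBy, hb', Bool.false_eq_true, if_false]
      refine List.Pairwise.cons ?_ (ih ht)
      intro z hz
      rcases List.mem_cons.mp ((PySem.List.insertBy_perm before x t).mem_iff.mp hz) with rfl | hz'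
      · exact h2 _ _ hb'
      · exact hy z hz' 

-- sorted2 over pairs is sorted (≤) on the first components
theorem pvSorted2_keyPairwise (l : List (String × String)) :
    (PySem.List.sorted2 l Prod.fst Prod.snd false).Pairwise (fun a b => a.1 ≤ b.1) := by
  have h1 : ∀ a b : String × String,
      (decide (a.1 < b.1) || (!decide (b.1 < a.1) && decide (a.2 < b.2))) = true → a.1 ≤ b.1 := by
    intro a b h
    simp only [Bool.or_eq_true, decide_eq_true_eq, Bool.and_eq_true, Bool.not_eq_true',
      decide_eq_false_iff_not] at h
    rcases h with h | ⟨h, _⟩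
    · exact le_of_lt h
    · exact le_of_not_gt h
  have h2 : ∀ a b : String × String,
      (decide (a.1 < b.1) || (!decide (b.1 < a.1) && decide (a.2 < b.2))) = false → b.1 ≤ a.1 := by
    intro a b h
    simp only [Bool.or_eq_false_iff, decide_eq_false_iff_not, Bool.and_eq_false_iff,
      Bool.not_eq_false', decide_eq_true_eq] at h
    exact le_of_not_gt h.1
  have H : ∀ (t acc : List (String × String)),
      acc.Pairwise (fun a b => a.1 ≤ b.1) →
      (t.foldl (fun acc x => PySem.List.insertBy
        (fun a b => decide (a.1 < b.1) || (!decide (b.1 < a.1) && decide (a.2 < b.2))) x acc)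
        acc).Pairwise (fun a b => a.1 ≤ b.1) := by
    intro t
    induction t with
    | nil => intro acc h; simpa using h
    | cons x t ih =>
      intro acc h
      exact ih _ (pvInsertBy_pairwise _ h1 h2 x acc h)
  exact H l [] (by simp)

-- the fst components are unchanged by the "extend the k-entry" map
theorem pvMapFst (items : List (String × List String)) (k : String) (w : List String) :
    (items.map (fun q => if q.1 = k then (k, q.2 ++ w) else q)).map Prod.fst
      = items.map Prod.fst := by
  rw [List.map_map]
  refine List.map_congr_left ?_
  intro q _
  by_cases h : q.1 = k <;> simp [h]

-- A's loop over a run of elements all keyed k (k already present) extends the k-entry in place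
theorem pvRunFold (run : List (String × String)) (k : String)
    (d : PySem.Dict String (List String))
    (hk : ∀ p ∈ run, p.1 = k) (hnd : d.keys.Nodup) (hc : d.contains k = true) :
    (run.foldl
      (fun d i =>
        if d.contains i.1 then d.modify i.1 [] (fun v => v ++ [i.2])
        else d.insert i.1 [i.2]) d).items
      = d.items.map (fun q => if q.1 = k then (k, q.2 ++ run.map Prod.snd) else q) := by
  induction run generalizing d with
  | nil =>
    simp only [List.foldl_nil, List.map_nil]
    refine ((List.map_congr_left ?_).trans (List.map_id _)).symm
    intro q _
    by_cases h : q.1 = k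
    · subst h; simp
    · simp [h]
  | cons p t ih =>
    have hpk : p.1 = k := hk p (List.mem_cons_self)
    have hcp : d.contains p.1 = true := by rw [hpk]; exact hc
    simp only [List.foldl_cons, hcp, if_true]
    set d1 := d.modify p.1 [] (fun v => v ++ [p.2]) with hd1
    have hitems1 : d1.items = d.items.map (fun q => if q.1 = k then (k, q.2 ++ [p.2]) else q) := by
      rw [hd1, hpk, PySem.Dict.modify, PySem.Dict.items_insert_of_contains _ _ hc]
      refine List.map_congr_left ?_
      intro q hq
      by_cases h : q.1 = k
      · have hq' : (k, q.2) ∈ d.items := by rw [← h]; exact hq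
        have hv : d.getD k [] = q.2 := PySem.Dict.getD_of_mem_items _ hq' hnd []
        simp [h, hv]
      · simp [h]
    have hkeys1 : d1.keys = d.keys := by
      show d1.items.map Prod.fst = d.items.map Prod.fst
      rw [hitems1, pvMapFst]
    have hc1 : d1.contains k = true := by
      rw [hd1, hpk, PySem.Dict.contains_modify]
      simp
    have hnd1 : d1.keys.Nodup := by rw [hkeys1]; exact hnd
    rw [ih d1 (fun p hp => hk p (List.mem_cons_of_mem _ hp)) hnd1 hc1, hitems1, List.map_map]
    refine List.map_congr_left ?_
    intro q _
    by_cases h : q.1 = k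
    · subst h; simp
    · simp [h]

-- after dropping the leading run of key k from a key-sorted list bounded below by k,
-- every remaining key differs from k
theorem pvDropNe (rest : List (String × String)) (k : String)
    (hp : rest.Pairwise (fun a b => a.1 ≤ b.1)) (hlb : ∀ p ∈ rest, k ≤ p.1) :
    ∀ p ∈ rest.dropWhile (fun p => p.1 == k), p.1 ≠ k := by
  induction rest with
  | nil => simp
  | cons x t ih =>
    rw [List.pairwise_cons] at hp
    obtain ⟨hx, ht⟩ := hp
    by_cases h : x.1 = k
    · rw [List.dropWhile_cons_of_pos (by simp [h])]
      exact ih ht (fun p hp => hlb p (List.mem_cons_of_mem _ hp))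
    · rw [List.dropWhile_cons_of_neg (by simp [h])]
      intro p hp
      rcases List.mem_cons.mp hp with rfl | hp
      · exact h
      · have h1 : k ≤ x.1 := hlb x List.mem_cons_self
        have h2 : x.1 ≤ p.1 := hx p hp
        intro hpk
        exact h (le_antisymm (hpk ▸ h2) h1)

-- main invariant: A's fold over a key-sorted list whose keys are all fresh for d
-- appends exactly B's run list to d's items
theorem pvMain (s : List (String × String)) (d : PySem.Dict String (List String))
    (hs : s.Pairwise (fun a b => a.1 ≤ b.1)) (hnd : d.keys.Nodup)
    (hfresh : ∀ p ∈ s, d.contains p.1 = false) :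
    (s.foldl
      (fun d i =>
        if d.contains i.1 then d.modify i.1 [] (fun v => v ++ [i.2])
        else d.insert i.1 [i.2]) d).items
      = d.items ++ pvRuns s := by
  induction s using pvRuns.induct generalizing d with
  | case1 => simp [pvRuns]
  | case2 k v rest ih =>
    rw [List.pairwise_cons] at hs
    obtain ⟨hkv, hrest⟩ := hs
    set run := rest.takeWhile (fun p => p.1 == k) with hrun
    set rest' := rest.dropWhile (fun p => p.1 == k) with hrest'
    have hsplit : rest = run ++ rest' := (List.takeWhile_append_dropWhile).symm
    have hcf : d.contains k = false := hfresh (k, v) List.mem_cons_self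
    have hkmem : k ∉ d.keys := by
      intro hm
      rw [(PySem.Dict.contains_iff_mem_keys d k).mpr hm] at hcf
      exact Bool.true_eq_false.mp hcf
    -- step 1: the head inserts a fresh key
    rw [hsplit] at hfresh hrest hkv ⊢
    simp only [List.foldl_cons, List.foldl_append, hcf, Bool.false_eq_true, if_false]
    set d1 := d.insert k [v] with hd1
    have hitems1 : d1.items = d.items ++ [(k, [v])] :=
      PySem.Dict.items_insert_of_not_contains d [v] hcf
    have hkeys1 : d1.keys = d.keys ++ [k] :=
      PySem.Dict.keys_insert_of_not_contains d [v] hcf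
    have hnd1 : d1.keys.Nodup := by
      rw [hkeys1]
      refine List.Nodup.append hnd (List.nodup_singleton k) ?_
      intro a ha hb
      simp only [List.mem_singleton] at hb
      exact hkmem (hb ▸ ha)
    have hc1 : d1.contains k = true := PySem.Dict.contains_insert_self d k [v]
    -- step 2: the run extends the (fresh, last) k-entry
    have hrunk : ∀ p ∈ run, p.1 = k := by
      intro p hp
      have := List.mem_takeWhile_imp hp
      simpa using this
    have h2 := pvRunFold run k d1 hrunk hnd1 hc1
    set d2 := run.foldl
      (fun d i =>
        if d.contains i.1 then d.modify i.1 [] (fun v => v ++ [i.2])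
        else d.insert i.1 [i.2]) d1 with hd2
    have hitems2 : d2.items = d.items ++ [(k, v :: run.map Prod.snd)] := by
      rw [h2, hitems1, List.map_append]
      congr 1
      · refine (List.map_congr_left ?_).trans (List.map_id _)
        intro q hq
        have hq1 : q.1 ≠ k := fun h => hkmem (h ▸ List.mem_map_of_mem hq)
        simp [hq1]
      · simp
    have hkeys2 : d2.keys = d.keys ++ [k] := by
      show d2.items.map Prod.fst = _
      rw [h2, pvMapFst, ← hkeys1]
      rfl
    have hnd2 : d2.keys.Nodup := by rw [hkeys2, ← hkeys1]; exact hnd1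
    -- step 3: the remaining keys are fresh for d2
    have hrest'sub : rest'.Sublist (run ++ rest') := List.sublist_append_right _ _
    have hp' : rest'.Pairwise (fun a b => a.1 ≤ b.1) := hrest.sublist hrest'sub
    have hdw : rest' = (run ++ rest').dropWhile (fun p => p.1 == k) := by
      rw [← hsplit]
    have hne : ∀ p ∈ rest', p.1 ≠ k := by
      intro p hp
      exact pvDropNe (run ++ rest') k hrest (fun p hp => hkv p hp) p (hdw ▸ hp)
    have hfresh2 : ∀ p ∈ rest', d2.contains p.1 = false := by
      intro p hp
      have hmem : p.1 ∉ d2.keys := by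
        rw [hkeys2]
        simp only [List.mem_append, List.mem_singleton]
        rintro (h | h)
        · have := hfresh p (List.mem_cons_of_mem _ (hrest'sub.mem hp))
          rw [(PySem.Dict.contains_iff_mem_keys d p.1).mpr h] at this
          exact Bool.true_eq_false.mp this
        · exact hne p hp h
      cases hcc : d2.contains p.1
      · rfl
      · exact absurd ((PySem.Dict.contains_iff_mem_keys d2 p.1).mp hcc) hmem
    rw [ih d2 hp' hnd2 hfresh2, hitems2]
    have hR : pvRuns ((k, v) :: (run ++ rest')) = (k, v :: run.map Prod.snd) :: pvRuns rest' := by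
      rw [pvRuns]
      rw [← hsplit, ← hrun, ← hrest']
    rw [hR]
    simp

-- ===== VERDICT (by name: the statement is the Claim_ definition above) =====
theorem pathByFileRoot_spec : Claim_equal_pathByFileRoot := by
  intro l _
  show pathByFileRoot l = pathByFileRoot_alt l
  unfold pathByFileRoot pathByFileRoot_alt
  rw [pvMain _ _ (pvSorted2_keyPairwise l) (by simp [PySem.Dict.empty])
    (fun p _ => by simp [PySem.Dict.empty, PySem.Dict.contains])]
  simp [PySem.Dict.empty]
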